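-- pv_equiv track=rewrite | github.com/iezyzhang/Project | Demo/第一季案例/第五章/5.4学生成绩.py | student_count
-- ===== SOURCE A (Python) =====
-- def student_count(name:list,result:list):
--     """
--     统计出学生的成绩的等级
--     :param name: 姓名列表
--     :param result: 成绩列表
--     :return: 结果list
--     """
--
--     name_a_list = []
--     name_b_list = []
--     name_c_list = []
--     # 遍历成绩列表
--     for index in range(len(result)):
--         if result[index] >= 85:
--
--             name_a_list.append(name[index])
--         elif result[index] >= 70:
--
--             name_b_list.append(name[index])
--         else:
--
--             name_c_list.append(name[index])
--     # 把结果凭借成一个list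
--     final_result_list = []
--     final_result_list.append(name_a_list)
--     final_result_list.append(name_b_list)
--     final_result_list.append(name_c_list)
--     return final_result_list
-- ===== SOURCE B (Python) =====
-- def student_count(name: list, result: list):
--     """Bucket students into grade categories by three filtered passes over zip(name, result)."""
--     pairs = list(zip(name, result))
--     a = [n for n, s in pairs if s >= 85]
--     b = [n for n, s in pairs if 70 <= s < 85]
--     c = [n for n, s in pairs if s < 70]
--     return [a, b, c]
-- ===== Notes on version B (the rewrite author's own statement) =====
-- stated objective: simpler
-- what changed: Replaces the single indexed loop with if/elif/else branching into three accumulators by three order-preserving filtered comprehensions over zip(name, result).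
import Mathlib
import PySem

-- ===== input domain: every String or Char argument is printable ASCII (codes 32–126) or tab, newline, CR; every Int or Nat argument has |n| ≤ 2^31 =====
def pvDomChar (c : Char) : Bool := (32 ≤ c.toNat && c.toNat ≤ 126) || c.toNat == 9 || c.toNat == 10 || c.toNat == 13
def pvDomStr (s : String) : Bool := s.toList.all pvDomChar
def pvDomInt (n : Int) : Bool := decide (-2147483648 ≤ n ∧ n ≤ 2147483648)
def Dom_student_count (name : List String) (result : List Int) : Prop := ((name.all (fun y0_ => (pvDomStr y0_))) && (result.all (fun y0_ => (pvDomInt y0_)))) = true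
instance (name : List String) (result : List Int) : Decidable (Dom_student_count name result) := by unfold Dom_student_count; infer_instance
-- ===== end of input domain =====

-- B replaces A's single indexed if/elif/else loop by three filtered passes over zip(name, result) (objective: simpler).

-- ===== PORT A =====
-- one pass over range(len(result)), three list accumulators, appends in branch order
def student_count (name : List String) (result : List Int) : List (List String) :=
  let st :=
    (PySem.List.pyRange 0 (result.length : Int) 1).foldl
      (fun (acc : List String × List String × List String) index =>
        if 85 ≤ PySem.List.pyGetD result index 0 then
          (acc.1 ++ [PySem.List.pyGetD name index ""], acc.2.1, acc.2.2)
        else if 70 ≤ PySem.List.pyGetD result index 0 then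
          (acc.1, acc.2.1 ++ [PySem.List.pyGetD name index ""], acc.2.2)
        else
          (acc.1, acc.2.1, acc.2.2 ++ [PySem.List.pyGetD name index ""]))
      ([], [], [])
  [st.1, st.2.1, st.2.2]

-- ===== PORT B =====
def student_count_alt (name : List String) (result : List Int) : List (List String) :=
  let pairs := name.zip result
  [ (pairs.filter (fun p => decide (85 ≤ p.2))).map Prod.fst,
    (pairs.filter (fun p => decide (70 ≤ p.2 ∧ p.2 < 85))).map Prod.fst,
    (pairs.filter (fun p => decide (p.2 < 70))).map Prod.fst ]

-- ===== PRECONDITION & SPEC =====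
-- Pre_ excludes exactly the inputs where A raises IndexError: result longer than name.
def Pre_student_count (name : List String) (result : List Int) : Prop :=
  result.length ≤ name.length
instance (name : List String) (result : List Int) : Decidable (Pre_student_count name result) := by unfold Pre_student_count; infer_instance
def pvWitness_student_count : List String × List Int := (["ann", "bob", "cy"], [90, 75, 60])

def Spec_student_count (name : List String) (result : List Int) (out : List (List String)) : Prop := out = student_count_alt name result
instance (name : List String) (result : List Int) (out : List (List String)) : Decidable (Spec_student_count name result out) := by unfold Spec_student_count; infer_instance

-- ===== CLAIM (what is proved, stated in full; the proofs are below) =====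
def Claim_equal_student_count : Prop := ∀ (name : List String) (result : List Int), Dom_student_count name result → Pre_student_count name result → Spec_student_count name result (student_count name result)

-- ===== LEMMAS AND PROOFS =====

-- A's indexed fold over range(len(result)) equals the same fold over zip(name, result), when in range.
theorem fold_range_eq_fold_zip {S : Type} (g : S → String → Int → S) :
    ∀ (rs : List Int) (nm : List String) (s : S), rs.length ≤ nm.length →
      (List.range rs.length).foldl (fun acc k => g acc (nm.getD k "") (rs.getD k 0)) s
        = (nm.zip rs).foldl (fun acc p => g acc p.1 p.2) s := by
  intro rs
  induction rs with
  | nil => intro nm s h; simp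
  | cons r rs ih =>
    intro nm s h
    cases nm with
    | nil => simp at h
    | cons n nm =>
      simp only [List.length_cons, List.range_succ_eq_map, List.foldl_cons, List.foldl_map,
        List.getD_cons_zero, List.getD_cons_succ, List.zip_cons_cons]
      exact ih nm _ (by simpa using h)

-- the bucketing fold accumulates exactly the three filtered projections
theorem bucket_fold_eq_filters :
    ∀ (ps : List (String × Int)) (a b c : List String),
      ps.foldl
        (fun (acc : List String × List String × List String) p =>
          if 85 ≤ p.2 then (acc.1 ++ [p.1], acc.2.1, acc.2.2)
          else if 70 ≤ p.2 then (acc.1, acc.2.1 ++ [p.1], acc.2.2)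
          else (acc.1, acc.2.1, acc.2.2 ++ [p.1])) (a, b, c)
        = (a ++ (ps.filter (fun p => decide (85 ≤ p.2))).map Prod.fst,
           b ++ (ps.filter (fun p => decide (70 ≤ p.2 ∧ p.2 < 85))).map Prod.fst,
           c ++ (ps.filter (fun p => decide (p.2 < 70))).map Prod.fst) := by
  intro ps
  induction ps with
  | nil => intro a b c; simp
  | cons p ps ih =>
    intro a b c
    simp only [List.foldl_cons, List.filter_cons]
    by_cases h1 : 85 ≤ p.2
    · have h2 : ¬(70 ≤ p.2 ∧ p.2 < 85) := by omega
      have h3 : ¬(p.2 < 70) := by omega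
      simp [h1, h2, h3, ih]
    · by_cases h2 : 70 ≤ p.2
      · have h3 : 70 ≤ p.2 ∧ p.2 < 85 := by omega
        have h4 : ¬(p.2 < 70) := by omega
        simp [h1, h3, h4, ih]
      · have h3 : p.2 < 70 := by omega
        simp [h1, h2, h3, ih]

theorem student_count_eq (name : List String) (result : List Int)
    (h : result.length ≤ name.length) :
    student_count name result = student_count_alt name result := by
  unfold student_count student_count_alt
  rw [show ((result.length : Int)) = ((result.length : Int) - 0) by ring] at *
  simp only [PySem.List.pyRange_one]
  simp only [Int.sub_zero, Int.toNat_natCast, List.foldl_map, PySem.List.pyGetD_natCast,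
    Int.zero_add]
  rw [fold_range_eq_fold_zip (fun acc nv rv =>
        if 85 ≤ rv then (acc.1 ++ [nv], acc.2.1, acc.2.2)
        else if 70 ≤ rv then (acc.1, acc.2.1 ++ [nv], acc.2.2)
        else (acc.1, acc.2.1, acc.2.2 ++ [nv])) result name _ h]
  rw [bucket_fold_eq_filters]
  simp

-- ===== VERDICT (by name: the statement is the Claim_ definition above) =====
theorem student_count_spec : Claim_equal_student_count := by
  intro name result _ hpre
  exact student_count_eq name result hpre
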